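-- pv_equiv track=rewrite | github.com/Saranshzu/O2_chatbot | robust_dgr_excel_reader.py | find_daily_kpi_sheet
-- ===== SOURCE A (Python) =====
-- from typing import Dict, Any, Optional, List
--
-- def find_daily_kpi_sheet(sheet_names: List[str]) -> Optional[str]:
--     """Find the Daily KPI sheet with flexible matching"""
--     # Exact matches first
--     daily_kpi_candidates = [
--         'Daily KPI', 'Daily_KPI', 'DAILY KPI', 'daily kpi',
--         'Daily Performance', 'Daily Data'
--     ]
--
--     for candidate in daily_kpi_candidates:
--         for sheet in sheet_names:
--             if sheet.strip().lower() == candidate.lower():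
--                 return sheet
--
--     # Partial matches
--     for sheet in sheet_names:
--         sheet_lower = sheet.lower()
--         if 'daily' in sheet_lower and 'kpi' in sheet_lower:
--             return sheet
--         elif 'daily' in sheet_lower and ('performance' in sheet_lower or 'data' in sheet_lower):
--             return sheet
--
--     return None
-- ===== SOURCE B (Python) =====
-- from typing import Optional, List
--
-- def find_daily_kpi_sheet(sheet_names: List[str]) -> Optional[str]:
--     """Find the Daily KPI sheet with flexible matching"""
--     # Index the first sheet for each normalized (stripped, lowercased) name.
--     index = {}
--     for sheet in sheet_names:
--         key = sheet.strip().lower()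
--         if key not in index:
--             index[key] = sheet
--
--     # Exact matches, in candidate-priority order.
--     for key in ('daily kpi', 'daily_kpi', 'daily performance', 'daily data'):
--         if key in index:
--             return index[key]
--
--     # Partial matches
--     for sheet in sheet_names:
--         sheet_lower = sheet.lower()
--         if 'daily' in sheet_lower and (
--             'kpi' in sheet_lower or 'performance' in sheet_lower or 'data' in sheet_lower
--         ):
--             return sheet
--
--     return None
-- ===== Notes on version B (the rewrite author's own statement) =====
-- stated objective: faster
-- what changed: B builds a dict from normalized sheet name to its first occurrence in one pass and replaces A's six candidate-by-candidate rescans of the sheet list with four lookups of the distinct normalized candidate keys; the partial-match pass merges A's two branches into one condition.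
import Mathlib
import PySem

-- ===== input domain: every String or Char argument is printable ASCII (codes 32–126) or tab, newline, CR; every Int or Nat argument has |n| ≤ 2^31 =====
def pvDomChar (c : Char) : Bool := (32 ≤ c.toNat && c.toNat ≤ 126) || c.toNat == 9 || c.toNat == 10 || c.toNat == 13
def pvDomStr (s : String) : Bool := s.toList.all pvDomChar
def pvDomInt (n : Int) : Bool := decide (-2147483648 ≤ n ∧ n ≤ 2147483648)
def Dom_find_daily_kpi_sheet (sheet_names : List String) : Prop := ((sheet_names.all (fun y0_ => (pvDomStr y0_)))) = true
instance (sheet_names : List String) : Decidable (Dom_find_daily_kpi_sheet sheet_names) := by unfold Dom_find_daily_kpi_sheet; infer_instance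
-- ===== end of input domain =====

-- B replaces A's repeated candidate-by-candidate scans of the sheet list with one pass that
-- indexes the first sheet per normalized name, followed by four dictionary lookups (simpler).

-- ===== PORT A =====
-- sheet.strip().lower()
def pvNorm (s : String) : String := PySem.Str.lower (PySem.Str.strip s)

def pvCandidatesA : List String :=
  ["Daily KPI", "Daily_KPI", "DAILY KPI", "daily kpi", "Daily Performance", "Daily Data"]

def find_daily_kpi_sheet (sheet_names : List String) : Option String :=
  match pvCandidatesA.findSome?
      (fun c => sheet_names.find? (fun s => pvNorm s == PySem.Str.lower c)) with
  | some s => some s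
  | none =>
    sheet_names.find? (fun s =>
      let sl := PySem.Str.lower s
      (PySem.Str.isIn "daily" sl && PySem.Str.isIn "kpi" sl) ||
      (PySem.Str.isIn "daily" sl &&
        (PySem.Str.isIn "performance" sl || PySem.Str.isIn "data" sl)))

-- ===== PORT B =====
-- index = {}; for sheet: key = sheet.strip().lower(); if key not in index: index[key] = sheet
def pvIndexB (sheet_names : List String) : PySem.Dict String String :=
  sheet_names.foldl
    (fun d s => if d.contains (pvNorm s) then d else d.insert (pvNorm s) s)
    PySem.Dict.empty

def find_daily_kpi_sheet_alt (sheet_names : List String) : Option String :=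
  let index := pvIndexB sheet_names
  match ["daily kpi", "daily_kpi", "daily performance", "daily data"].findSome?
      (fun k => index.get? k) with
  | some s => some s
  | none =>
    sheet_names.find? (fun s =>
      let sl := PySem.Str.lower s
      PySem.Str.isIn "daily" sl &&
        (PySem.Str.isIn "kpi" sl || PySem.Str.isIn "performance" sl ||
          PySem.Str.isIn "data" sl))

-- ===== PRECONDITION & SPEC =====
def Spec_find_daily_kpi_sheet (sheet_names : List String) (out : Option String) : Prop := out = find_daily_kpi_sheet_alt sheet_names
instance (sheet_names : List String) (out : Option String) : Decidable (Spec_find_daily_kpi_sheet sheet_names out) := by unfold Spec_find_daily_kpi_sheet; infer_instance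

-- ===== CLAIM (what is proved, stated in full; the proofs are below) =====
def Claim_equal_find_daily_kpi_sheet : Prop := ∀ (sheet_names : List String), Dom_find_daily_kpi_sheet sheet_names → Spec_find_daily_kpi_sheet sheet_names (find_daily_kpi_sheet sheet_names)

-- ===== LEMMAS AND PROOFS =====

-- B's index looks up exactly what A's inner scan finds: the first sheet with the given normalized name.
theorem pvIndexB_get? (sheet_names : List String) (k : String) :
    (pvIndexB sheet_names).get? k
      = sheet_names.find? (fun s => pvNorm s == k) := by
  suffices h : ∀ (ns : List String) (d : PySem.Dict String String),
      (ns.foldl (fun d s => if d.contains (pvNorm s) then d else d.insert (pvNorm s) s) d).get? k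
        = (d.get? k).or (ns.find? (fun s => pvNorm s == k)) by
    simpa [pvIndexB, PySem.Dict.get?_empty] using h sheet_names PySem.Dict.empty
  intro ns
  induction ns with
  | nil => intro d; simp
  | cons s t ih =>
    intro d
    rw [List.foldl_cons]
    by_cases hk : pvNorm s = k
    · subst hk
      rw [List.find?_cons_of_pos (h := by simp)]
      by_cases hc : d.contains (pvNorm s) = true
      · rw [if_pos hc, ih]
        obtain ⟨v, hv⟩ : ∃ v, d.get? (pvNorm s) = some v := by
          rw [PySem.Dict.contains_eq_isSome_get?] at hc
          exact Option.isSome_iff_exists.mp hc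
        simp [hv]
      · rw [if_neg hc, ih]
        have hd : d.get? (pvNorm s) = none := by
          rw [PySem.Dict.contains_eq_isSome_get?] at hc
          simpa using hc
        rw [hd, PySem.Dict.get?_insert_self]
        simp
    · rw [List.find?_cons_of_neg (h := by simp [hk])]
      by_cases hc : d.contains (pvNorm s) = true
      · rw [if_pos hc, ih]
      · rw [if_neg hc, ih, PySem.Dict.get?_insert_of_ne _ _ (Ne.symm hk)]

-- The two partial-match predicates are the same Boolean function.
theorem pvPartial_pred_eq (sl : String) :
    ((PySem.Str.isIn "daily" sl && PySem.Str.isIn "kpi" sl) ||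
      (PySem.Str.isIn "daily" sl &&
        (PySem.Str.isIn "performance" sl || PySem.Str.isIn "data" sl)))
    = (PySem.Str.isIn "daily" sl &&
        (PySem.Str.isIn "kpi" sl || PySem.Str.isIn "performance" sl ||
          PySem.Str.isIn "data" sl)) := by
  cases PySem.Str.isIn "daily" sl <;>
    cases PySem.Str.isIn "kpi" sl <;>
    cases PySem.Str.isIn "performance" sl <;>
    cases PySem.Str.isIn "data" sl <;> rfl

-- ===== VERDICT (by name: the statement is the Claim_ definition above) =====
theorem find_daily_kpi_sheet_spec : Claim_equal_find_daily_kpi_sheet := by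
  intro ns _
  show find_daily_kpi_sheet ns = find_daily_kpi_sheet_alt ns
  unfold find_daily_kpi_sheet find_daily_kpi_sheet_alt
  have hpart :
      ns.find? (fun s =>
        let sl := PySem.Str.lower s
        (PySem.Str.isIn "daily" sl && PySem.Str.isIn "kpi" sl) ||
        (PySem.Str.isIn "daily" sl &&
          (PySem.Str.isIn "performance" sl || PySem.Str.isIn "data" sl)))
      = ns.find? (fun s =>
        let sl := PySem.Str.lower s
        PySem.Str.isIn "daily" sl &&
          (PySem.Str.isIn "kpi" sl || PySem.Str.isIn "performance" sl ||
            PySem.Str.isIn "data" sl)) := by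
    congr 1
    funext s
    exact pvPartial_pred_eq (PySem.Str.lower s)
  rw [hpart]
  simp only [pvCandidatesA, List.findSome?, pvIndexB_get?]
  have e1 : PySem.Str.lower "Daily KPI" = "daily kpi" := by decide
  have e2 : PySem.Str.lower "Daily_KPI" = "daily_kpi" := by decide
  have e3 : PySem.Str.lower "DAILY KPI" = "daily kpi" := by decide
  have e4 : PySem.Str.lower "daily kpi" = "daily kpi" := by decide
  have e5 : PySem.Str.lower "Daily Performance" = "daily performance" := by decide
  have e6 : PySem.Str.lower "Daily Data" = "daily data" := by decide
  rw [e1, e2, e3, e4, e5, e6]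
  rcases h1 : ns.find? (fun s => pvNorm s == "daily kpi") with _ | v <;>
    rcases h2 : ns.find? (fun s => pvNorm s == "daily_kpi") with _ | v2 <;>
    simp
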